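-- pv_equiv track=rewrite | github.com/israrwz/glyph-grid | scripts/inspect_phase2_ckpt.py | classify_arch
-- ===== SOURCE A (Python) =====
-- from typing import Dict, Any, List, Tuple, Optional
--
-- def classify_arch(keys: List[str]) -> str:
--     """Return 'transformer', 'cnn', or 'unknown'.
--
--     Enhanced:
--       - Handles optional leading prefixes: 'model.', 'module.', 'net.'.
--       - More robust CNN detection via presence of any 'features.' residual pattern.
--       - More robust transformer detection via any 'encoder.' or multi-head attn pattern.
--     """
--     # Strip common wrappers
--     normalized = []
--     for k in keys:
--         nk = k
--         for prefix in ("model.", "module.", "net."):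
--             if nk.startswith(prefix):
--                 nk = nk[len(prefix) :]
--         normalized.append(nk)
--
--     # Transformer indicators
--     if any(
--         ("encoder." in k)
--         or ("cls_token" in k)
--         or ("primitive_embedding.weight" in k)
--         or ("positional" in k)
--         or ("multihead" in k)
--         for k in normalized
--     ):
--         return "transformer"
--
--     # CNN indicators (stem + features residual blocks)
--     if any(
--         ("stem.conv" in k)
--         or ("features." in k and ".conv1.conv.weight" in k)
--         or ("features." in k and ".conv.weight" in k and ".conv1." not in k)
--         for k in normalized
--     ):
--         return "cnn"
--
--     return "unknown"
-- ===== SOURCE B (Python) =====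
-- def classify_arch(keys):
--     """Single fused pass: strip wrapper prefixes per key, return 'transformer'
--     immediately on a transformer indicator, defer the CNN decision to a flag."""
--     TRANS = ("encoder.", "cls_token", "primitive_embedding.weight", "positional", "multihead")
--     found_cnn = False
--     for k in keys:
--         nk = k
--         for prefix in ("model.", "module.", "net."):
--             if nk.startswith(prefix):
--                 nk = nk[len(prefix):]
--         if any(t in nk for t in TRANS):
--             return "transformer"
--         if ("stem.conv" in nk) or ("features." in nk and (".conv1.conv.weight" in nk or (".conv.weight" in nk and ".conv1." not in nk))):
--             found_cnn = True
--     return "cnn" if found_cnn else "unknown"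
-- ===== Notes on version B (the rewrite author's own statement) =====
-- stated objective: alternative
-- what changed: B fuses everything into one pass over the raw keys: it strips prefixes per key, returns 'transformer' immediately on a transformer indicator and defers the CNN decision to a flag, removing A's intermediate normalized list and its two separate any() scans.
import Mathlib
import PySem

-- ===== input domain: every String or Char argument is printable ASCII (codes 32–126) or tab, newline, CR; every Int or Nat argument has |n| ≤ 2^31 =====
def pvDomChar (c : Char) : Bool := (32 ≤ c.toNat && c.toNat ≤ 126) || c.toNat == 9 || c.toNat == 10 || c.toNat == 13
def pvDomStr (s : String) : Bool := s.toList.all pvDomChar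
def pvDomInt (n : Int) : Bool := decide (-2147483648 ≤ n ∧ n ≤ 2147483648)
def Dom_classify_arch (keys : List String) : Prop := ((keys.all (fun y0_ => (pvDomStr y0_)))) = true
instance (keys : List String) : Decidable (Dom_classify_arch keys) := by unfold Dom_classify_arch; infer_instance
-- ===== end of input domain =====

-- B replaces A's intermediate normalized list and two separate any() scans by one
-- fused pass with an early transformer return and a deferred CNN flag (objective:
-- alternative decomposition; same asymptotic cost).

-- shared helper: both Pythons strip the wrapper prefixes with the same inner loop
def pvStrip (k : String) : String :=
  (["model.", "module.", "net."] : List String).foldl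
    (fun nk p => if PySem.Str.startswith nk p then PySem.Str.slice nk (some (PySem.Str.len p)) none else nk) k

-- ===== PORT A =====
def pvTransA (k : String) : Bool :=
  PySem.Str.isIn "encoder." k || PySem.Str.isIn "cls_token" k ||
  PySem.Str.isIn "primitive_embedding.weight" k || PySem.Str.isIn "positional" k ||
  PySem.Str.isIn "multihead" k

def pvCnnA (k : String) : Bool :=
  PySem.Str.isIn "stem.conv" k ||
  (PySem.Str.isIn "features." k && PySem.Str.isIn ".conv1.conv.weight" k) ||
  (PySem.Str.isIn "features." k && PySem.Str.isIn ".conv.weight" k && !PySem.Str.isIn ".conv1." k)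

def classify_arch (keys : List String) : String :=
  let normalized := keys.foldl (fun acc k => acc ++ [pvStrip k]) []
  if normalized.any pvTransA then "transformer"
  else if normalized.any pvCnnA then "cnn"
  else "unknown"

-- ===== PORT B =====
def pvCnnB (nk : String) : Bool :=
  PySem.Str.isIn "stem.conv" nk ||
  (PySem.Str.isIn "features." nk &&
    (PySem.Str.isIn ".conv1.conv.weight" nk ||
     (PySem.Str.isIn ".conv.weight" nk && !PySem.Str.isIn ".conv1." nk)))

def pvGo : List String → Bool → String
  | [], found => if found then "cnn" else "unknown"
  | k :: rest, found =>
    let nk := pvStrip k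
    if (["encoder.", "cls_token", "primitive_embedding.weight", "positional", "multihead"] : List String).any
         (fun t => PySem.Str.isIn t nk) then "transformer"
    else pvGo rest (found || pvCnnB nk)

def classify_arch_alt (keys : List String) : String := pvGo keys false

-- ===== PRECONDITION & SPEC =====
def Spec_classify_arch (keys : List String) (out : String) : Prop := out = classify_arch_alt keys
instance (keys : List String) (out : String) : Decidable (Spec_classify_arch keys out) := by unfold Spec_classify_arch; infer_instance

-- ===== CLAIM (what is proved, stated in full; the proofs are below) =====
def Claim_equal_classify_arch : Prop := ∀ (keys : List String), Dom_classify_arch keys → Spec_classify_arch keys (classify_arch keys)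

-- ===== LEMMAS AND PROOFS =====

lemma pvCnn_eq (k : String) : pvCnnA k = pvCnnB k := by
  unfold pvCnnA pvCnnB
  cases PySem.Str.isIn "stem.conv" k <;>
    cases PySem.Str.isIn "features." k <;>
      cases PySem.Str.isIn ".conv1.conv.weight" k <;>
        cases PySem.Str.isIn ".conv.weight" k <;>
          cases PySem.Str.isIn ".conv1." k <;> rfl

lemma pvTrans_eq (k : String) :
    ((["encoder.", "cls_token", "primitive_embedding.weight", "positional", "multihead"] : List String).any
      (fun t => PySem.Str.isIn t k)) = pvTransA k := by
  simp [pvTransA, Bool.or_assoc]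

lemma foldl_append_map (f : String → String) (keys : List String) (acc : List String) :
    keys.foldl (fun a k => a ++ [f k]) acc = acc ++ keys.map f := by
  induction keys generalizing acc with
  | nil => simp
  | cons k rest ih => simp [List.foldl_cons, ih]

lemma pvGo_cons (k : String) (rest : List String) (found : Bool) :
    pvGo (k :: rest) found =
      if pvTransA (pvStrip k) then "transformer"
      else pvGo rest (found || pvCnnB (pvStrip k)) := by
  rw [pvGo, pvTrans_eq]

lemma pvGo_spec (keys : List String) (found : Bool) :
    pvGo keys found =
      if keys.any (fun k => pvTransA (pvStrip k)) then "transformer"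
      else if (found || keys.any (fun k => pvCnnB (pvStrip k))) then "cnn"
      else "unknown" := by
  induction keys generalizing found with
  | nil => simp [pvGo]
  | cons k rest ih =>
    rw [pvGo_cons, ih, List.any_cons, List.any_cons]
    cases pvTransA (pvStrip k) <;>
      cases pvCnnB (pvStrip k) <;>
        cases found <;> simp

-- ===== VERDICT (by name: the statement is the Claim_ definition above) =====
theorem classify_arch_spec : Claim_equal_classify_arch := by
  intro keys _
  show classify_arch keys = classify_arch_alt keys
  unfold classify_arch classify_arch_alt
  rw [foldl_append_map pvStrip keys [], List.nil_append, pvGo_spec]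
  simp only [List.any_map, Bool.false_or, Function.comp_def]
  rw [show (fun k => pvCnnA (pvStrip k)) = (fun k => pvCnnB (pvStrip k)) from
    funext fun k => pvCnn_eq (pvStrip k)]
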